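-- pv_equiv track=rewrite | github.com/Haimryck/TIPE | mastermind_jeu.py | comptage
-- ===== SOURCE A (Python) =====
-- num_colors = 6
--
-- def comptage(code):
--     tableau = []
--     for i in range(1, num_colors+1):
--         compte = 0
--         for j in range(len(code)):
--             if code[j] == i:
--                 compte += 1
--         tableau.append(compte)
--     return tableau
-- ===== SOURCE B (Python) =====
-- def comptage(code):
--     counts = {}
--     for v in code:
--         counts[v] = counts.get(v, 0) + 1
--     return [counts.get(i, 0) for i in range(1, 7)]
-- ===== Notes on version B (the rewrite author's own statement) =====
-- stated objective: idiomatic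
-- what changed: Replaces the nested color-by-color scan (6 passes over code) with one tally pass building a frequency dict, then a fixed sweep over colors 1..6.
import Mathlib
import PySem

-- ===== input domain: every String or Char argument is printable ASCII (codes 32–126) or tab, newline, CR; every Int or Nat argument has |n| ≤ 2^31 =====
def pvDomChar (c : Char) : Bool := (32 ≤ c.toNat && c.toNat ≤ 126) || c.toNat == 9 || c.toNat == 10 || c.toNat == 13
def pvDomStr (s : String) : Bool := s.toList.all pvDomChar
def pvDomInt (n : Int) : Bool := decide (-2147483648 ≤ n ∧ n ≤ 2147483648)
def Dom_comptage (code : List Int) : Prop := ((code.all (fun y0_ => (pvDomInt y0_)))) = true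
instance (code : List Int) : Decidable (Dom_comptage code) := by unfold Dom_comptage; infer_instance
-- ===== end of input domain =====

-- B replaces A's six scans of `code` with one tally pass into a dict plus a sweep over colors 1..6 (idiomatic).

-- ===== PORT A =====
def comptage (code : List Int) : List Int :=
  (PySem.List.pyRange 1 (6 + 1) 1).foldl
    (fun tableau i =>
      let compte : Int :=
        (PySem.List.pyRange 0 (PySem.List.len code) 1).foldl
          (fun compte j => if PySem.List.pyGetD code j 0 == i then compte + 1 else compte) 0
      tableau ++ [compte]) []

-- ===== PORT B =====
def comptage_alt (code : List Int) : List Int :=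
  let counts : PySem.Dict Int Int :=
    code.foldl (fun counts v => counts.insert v (counts.getD v 0 + 1)) PySem.Dict.empty
  (PySem.List.pyRange 1 7 1).map (fun i => counts.getD i 0)

-- ===== PRECONDITION & SPEC =====
def Spec_comptage (code : List Int) (out : List Int) : Prop := out = comptage_alt code
instance (code : List Int) (out : List Int) : Decidable (Spec_comptage code out) := by unfold Spec_comptage; infer_instance

-- ===== CLAIM (what is proved, stated in full; the proofs are below) =====
def Claim_equal_comptage : Prop := ∀ (code : List Int), Dom_comptage code → Spec_comptage code (comptage code)

-- ===== LEMMAS AND PROOFS =====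

-- the tally loop of B is Counter(code)
theorem tally_eq_counter (code : List Int) :
    code.foldl (fun counts v => counts.insert v (counts.getD v 0 + 1)) PySem.Dict.empty
      = PySem.Dict.counter code := by
  rw [PySem.Dict.counter_eq_foldl]
  induction code using List.reverseRecOn with
  | nil => rfl
  | append_singleton xs x ih =>
      simp only [List.foldl_append, List.foldl_cons, List.foldl_nil, ih]
      unfold PySem.Dict.modify
      simp

theorem pyRange_one_seven : PySem.List.pyRange 1 7 1 = [1, 2, 3, 4, 5, 6] := by decide

theorem inner_count (code : List Int) (i : Int) :
    (PySem.List.pyRange 0 (code.length : Int) 1).foldl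
      (fun compte j => if PySem.List.pyGetD code j 0 = i then compte + 1 else compte) 0
      = (code.count i : Int) := by
  rw [PySem.List.foldl_pyRange_zero_pyGetD' code 0
        (fun compte v => if v = i then compte + 1 else compte) 0,
      PySem.List.foldl_ite_add_one]
  rw [zero_add, List.count_eq_countP]
  norm_cast

theorem comptage_spec : Claim_equal_comptage := by
  intro code _
  show comptage code = comptage_alt code
  unfold comptage comptage_alt
  rw [tally_eq_counter]
  norm_num
  rw [pyRange_one_seven]
  simp [inner_count]
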